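-- pv_equiv track=rewrite | github.com/minxingzhang0107/Protecting-Privacy-of-Data-Buyers-in-Data-Markets | main/data_preparation.py | create_true_intent_deliberate
-- ===== SOURCE A (Python) =====
-- def create_true_intent_deliberate(unique_values_on_each_dimension):
--     true_intent = []
--     for i in range(len(unique_values_on_each_dimension)):
--         if i == 0:
--             # working adult
--             current_dimension_true_intent = ['working adult']
--             true_intent.append(current_dimension_true_intent)
--         if i == 1:
--             # Black or Asian-Pac-Islander
--             current_dimension_true_intent = ['Black', 'Asian-Pac-Islander']
--             true_intent.append(current_dimension_true_intent)
--             continue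
--         if i == 2:
--             # Female
--             current_dimension_true_intent = ['Female']
--             true_intent.append(current_dimension_true_intent)
--         if i == 3:
--             # full-time
--             current_dimension_true_intent = ['full-time']
--             true_intent.append(current_dimension_true_intent)
--         if i == 4:
--             # >50K
--             current_dimension_true_intent = ['>50K']
--             true_intent.append(current_dimension_true_intent)
--     return true_intent
-- ===== SOURCE B (Python) =====
-- _TRUE_INTENT_TABLE = [
--     ['working adult'],
--     ['Black', 'Asian-Pac-Islander'],
--     ['Female'],
--     ['full-time'],
--     ['>50K'],
-- ]
--
-- def create_true_intent_deliberate(unique_values_on_each_dimension):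
--     return _TRUE_INTENT_TABLE[:len(unique_values_on_each_dimension)]
-- ===== Notes on version B (the rewrite author's own statement) =====
-- stated objective: simpler
-- what changed: Replaces the index loop with per-index if-chains (and a stray continue) by a single literal table sliced to the input's length.
import Mathlib
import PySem

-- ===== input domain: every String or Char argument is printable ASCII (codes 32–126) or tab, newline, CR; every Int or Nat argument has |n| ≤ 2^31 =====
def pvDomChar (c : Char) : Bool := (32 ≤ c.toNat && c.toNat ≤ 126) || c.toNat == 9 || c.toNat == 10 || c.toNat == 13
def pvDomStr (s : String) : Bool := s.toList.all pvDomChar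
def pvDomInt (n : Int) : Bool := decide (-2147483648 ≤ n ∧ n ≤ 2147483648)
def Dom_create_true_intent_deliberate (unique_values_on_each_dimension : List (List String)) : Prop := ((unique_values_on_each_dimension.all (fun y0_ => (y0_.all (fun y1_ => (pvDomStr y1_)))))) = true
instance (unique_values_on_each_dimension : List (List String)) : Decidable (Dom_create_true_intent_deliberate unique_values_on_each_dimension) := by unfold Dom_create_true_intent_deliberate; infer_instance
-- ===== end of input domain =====

-- B replaces A's index loop with an if-chain per index by one literal table sliced to the input length (simpler).

-- ===== PORT A =====
-- one iteration of A's loop body (the if-chain; the 'continue' after i == 1 skips the rest)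
def pvStepA (acc : List (List String)) (i : Int) : List (List String) :=
  let acc1 := if i == 0 then acc ++ [["working adult"]] else acc
  if i == 1 then acc1 ++ [["Black", "Asian-Pac-Islander"]]
  else
    let acc2 := if i == 2 then acc1 ++ [["Female"]] else acc1
    let acc3 := if i == 3 then acc2 ++ [["full-time"]] else acc2
    if i == 4 then acc3 ++ [[">50K"]] else acc3

def create_true_intent_deliberate (unique_values_on_each_dimension : List (List String)) : List (List String) :=
  (PySem.List.pyRange 0 (unique_values_on_each_dimension.length : Int) 1).foldl pvStepA []

-- ===== PORT B =====
def pvTrueIntentTable : List (List String) :=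
  [["working adult"], ["Black", "Asian-Pac-Islander"], ["Female"], ["full-time"], [">50K"]]

def create_true_intent_deliberate_alt (unique_values_on_each_dimension : List (List String)) : List (List String) :=
  PySem.List.slice pvTrueIntentTable none (some (unique_values_on_each_dimension.length : Int))

-- ===== PRECONDITION & SPEC =====
def Spec_create_true_intent_deliberate (unique_values_on_each_dimension : List (List String)) (out : List (List String)) : Prop := out = create_true_intent_deliberate_alt unique_values_on_each_dimension
instance (unique_values_on_each_dimension : List (List String)) (out : List (List String)) : Decidable (Spec_create_true_intent_deliberate unique_values_on_each_dimension out) := by unfold Spec_create_true_intent_deliberate; infer_instance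

-- ===== CLAIM (what is proved, stated in full; the proofs are below) =====
def Claim_equal_create_true_intent_deliberate : Prop := ∀ (unique_values_on_each_dimension : List (List String)), Dom_create_true_intent_deliberate unique_values_on_each_dimension → Spec_create_true_intent_deliberate unique_values_on_each_dimension (create_true_intent_deliberate unique_values_on_each_dimension)

-- ===== LEMMAS AND PROOFS =====
lemma pvLoop_eq_take (n : Nat) :
    (PySem.List.pyRange 0 (n : Int) 1).foldl pvStepA [] = pvTrueIntentTable.take n := by
  induction n with
  | zero => simp
  | succ m ih =>
    have h : (PySem.List.pyRange 0 ((m + 1 : Nat) : Int) 1)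
        = PySem.List.pyRange 0 (m : Int) 1 ++ [(m : Int)] := by
      push_cast
      exact PySem.List.pyRange_one_succ_right (by omega)
    rw [h, List.foldl_append, ih]
    by_cases hm : m < 5
    · interval_cases m <;> simp [pvStepA, pvTrueIntentTable]
    · have h1 : pvTrueIntentTable.take m = pvTrueIntentTable := by
        apply List.take_of_length_le; simp [pvTrueIntentTable]; omega
      have h2 : pvTrueIntentTable.take (m + 1) = pvTrueIntentTable := by
        apply List.take_of_length_le; simp [pvTrueIntentTable]; omega
      simp only [List.foldl_cons, List.foldl_nil, h1, h2]
      have : ∀ k, (m : Int) ≠ k → ((m : Int) == k) = false := by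
        intro k hk; simpa using hk
      simp [pvStepA, this 0 (by omega), this 1 (by omega), this 2 (by omega),
        this 3 (by omega), this 4 (by omega)]

-- ===== VERDICT (by name: the statement is the Claim_ definition above) =====
theorem create_true_intent_deliberate_spec : Claim_equal_create_true_intent_deliberate := by
  intro x _
  unfold Spec_create_true_intent_deliberate create_true_intent_deliberate create_true_intent_deliberate_alt
  rw [PySem.List.slice_to_natCast, pvLoop_eq_take]
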